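-- pv_equiv track=rewrite | github.com/grasshopperTrainer/coding_practice | baekjoon/accepted/DS/1717 집합의 표현.py | solution
-- ===== SOURCE A (Python) =====
-- def find(node, ds):
--     if ds[node] == node:
--         return node
--     ds[node] = find(ds[node], ds)
--     return ds[node]
--
-- def union(a, b, ds):
--     roots = [find(x, ds) for x in (a, b)]
--     if roots[0] == roots[1]:
--         return
--     ds[roots[0]] = roots[1]
--
-- def solution(N, queries):
--     ds = [i for i in range(N+1)]
--
--     answers = []
--     for op, a, b in queries:
--         if op == 0:
--             union(a, b, ds)
--         elif op == 1:
--             answers.append(('NO', 'YES')[find(a, ds) == find(b, ds)])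
--     return answers
-- ===== SOURCE B (Python) =====
-- def solution(N, queries):
--     # Flat representative array: ds[x] is directly the representative of x.
--     # union relabels every member of a's class to b's root; queries are O(1) lookups.
--     ds = list(range(N + 1))
--     answers = []
--     for op, a, b in queries:
--         if op == 0:
--             ra, rb = ds[a], ds[b]
--             if ra != rb:
--                 ds = [rb if v == ra else v for v in ds]
--         elif op == 1:
--             answers.append('YES' if ds[a] == ds[b] else 'NO')
--     return answers
-- ===== Notes on version B (the rewrite author's own statement) =====
-- stated objective: alternative
-- what changed: Replaces the recursive path-compressing union-find forest by a flat representative array: union reads both representatives directly and relabels every cell of the losing class to the winning root, and connectivity queries become two direct lookups instead of root-chasing finds.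
import Mathlib
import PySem

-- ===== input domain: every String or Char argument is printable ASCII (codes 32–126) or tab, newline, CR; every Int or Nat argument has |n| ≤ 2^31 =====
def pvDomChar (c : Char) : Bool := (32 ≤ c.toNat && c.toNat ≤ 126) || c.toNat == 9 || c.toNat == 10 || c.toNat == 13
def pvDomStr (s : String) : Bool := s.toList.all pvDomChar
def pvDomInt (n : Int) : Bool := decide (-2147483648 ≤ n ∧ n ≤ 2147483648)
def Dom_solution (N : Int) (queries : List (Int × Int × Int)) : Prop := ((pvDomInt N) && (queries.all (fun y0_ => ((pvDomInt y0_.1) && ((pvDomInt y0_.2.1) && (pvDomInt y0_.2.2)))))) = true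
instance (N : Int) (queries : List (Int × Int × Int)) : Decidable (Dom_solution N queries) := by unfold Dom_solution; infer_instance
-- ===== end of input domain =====

-- B replaces the recursive path-compressing union-find by a flat representative array
-- (union relabels a whole class, queries are direct lookups); equal answers, objective: alternative.


-- ===== PORT A =====
-- find(node, ds): recursion with path compression.  The fuel argument is a totality guard
-- only (the proof shows queries.length + 2 always suffices inside Pre_); the `none` branch is
-- where Python raises IndexError, excluded by Pre_.
def pvFindA : Nat → List Int → Int → List Int × Int
  | 0, ds, node => (ds, node)
  | fuel+1, ds, node =>
    match PySem.List.pyGet? ds node with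
    | none => (ds, node)
    | some p =>
      if p = node then (ds, node)
      else
        let r := pvFindA fuel ds p
        -- ds[node] = find(ds[node], ds); return ds[node]  (the cell just written holds r.2)
        (PySem.List.pySetD r.1 node r.2, r.2)

def pvUnionA (fuel : Nat) (a b : Int) (ds : List Int) : List Int :=
  let r1 := pvFindA fuel ds a
  let r2 := pvFindA fuel r1.1 b
  if r1.2 = r2.2 then r2.1 else PySem.List.pySetD r2.1 r1.2 r2.2

def pvLoopA (fuel : Nat) : List Int → List String → List (Int × Int × Int) → List String
  | _, acc, [] => acc.reverse
  | ds, acc, (op, a, b) :: qs =>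
    if op = 0 then pvLoopA fuel (pvUnionA fuel a b ds) acc qs
    else if op = 1 then
      let r1 := pvFindA fuel ds a
      let r2 := pvFindA fuel r1.1 b
      pvLoopA fuel r2.1 ((if r1.2 = r2.2 then "YES" else "NO") :: acc) qs
    else pvLoopA fuel ds acc qs

def solution (N : Int) (queries : List (Int × Int × Int)) : List String :=
  pvLoopA (queries.length + 2) (PySem.List.pyRange 0 (N + 1) 1) [] queries

-- ===== PORT B =====
def pvLoopB : List Int → List String → List (Int × Int × Int) → List String
  | _, acc, [] => acc.reverse
  | f, acc, (op, a, b) :: qs =>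
    if op = 0 then
      let ra := PySem.List.pyGetD f a 0
      let rb := PySem.List.pyGetD f b 0
      pvLoopB (if ra = rb then f else f.map fun v => if v = ra then rb else v) acc qs
    else if op = 1 then
      pvLoopB f ((if PySem.List.pyGetD f a 0 = PySem.List.pyGetD f b 0 then "YES" else "NO") :: acc) qs
    else pvLoopB f acc qs

def solution_alt (N : Int) (queries : List (Int × Int × Int)) : List String :=
  pvLoopB (PySem.List.pyRange 0 (N + 1) 1) [] queries

-- ===== PRECONDITION & SPEC =====
-- Pre_ excludes exactly the inputs where Python A raises IndexError: a union/query touching an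
-- index outside [-(N+1), N] of the (N+1)-element array (for N < 0, any union/query at all).
def Pre_solution (N : Int) (queries : List (Int × Int × Int)) : Prop :=
  ∀ q ∈ queries, (q.1 = 0 ∨ q.1 = 1) →
    (-(N+1) ≤ q.2.1 ∧ q.2.1 < N+1 ∧ -(N+1) ≤ q.2.2 ∧ q.2.2 < N+1)
instance (N : Int) (queries : List (Int × Int × Int)) : Decidable (Pre_solution N queries) := by
  unfold Pre_solution; infer_instance

def pvWitness_solution : Int × (List (Int × Int × Int)) :=
  (2, [(0, 0, 1), (1, 0, 1), (1, 1, 2)])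

def Spec_solution (N : Int) (queries : List (Int × Int × Int)) (out : List String) : Prop := out = solution_alt N queries
instance (N : Int) (queries : List (Int × Int × Int)) (out : List String) : Decidable (Spec_solution N queries out) := by unfold Spec_solution; infer_instance

-- ===== CLAIM (what is proved, stated in full; the proofs are below) =====
def Claim_equal_solution : Prop := ∀ (N : Int) (queries : List (Int × Int × Int)), Dom_solution N queries → Pre_solution N queries → Spec_solution N queries (solution N queries)

-- ===== LEMMAS AND PROOFS =====

-- One parent-pointer step (as an index), and its k-fold iteration.
def pvStep (ds : List Int) (j : Nat) : Nat := (ds.getD j 0).toNat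

def pvIter (ds : List Int) : Nat → Nat → Nat
  | 0, j => j
  | k+1, j => pvIter ds k (pvStep ds j)

-- Invariant tying A's forest ds to B's flat array f: same length, parent pointers in range,
-- and every node reaches, within B steps, a ds-fixed root whose index is its f-entry.
def pvInv (B : Nat) (ds f : List Int) : Prop :=
  f.length = ds.length ∧
  (∀ j, j < ds.length → 0 ≤ ds.getD j 0 ∧ (ds.getD j 0).toNat < ds.length) ∧
  (∀ j, j < ds.length → ∃ k ≤ B, ((pvIter ds k j : Nat) : Int) = f.getD j 0 ∧
      ds.getD (f.getD j 0).toNat 0 = f.getD j 0)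

theorem pvIter_succ_right (ds : List Int) (k j : Nat) :
    pvIter ds (k+1) j = pvStep ds (pvIter ds k j) := by
  induction k generalizing j with
  | zero => rfl
  | succ k ih => rw [pvIter, ih, pvIter]

theorem pvIter_add (ds : List Int) (a b j : Nat) :
    pvIter ds (a + b) j = pvIter ds b (pvIter ds a j) := by
  induction a generalizing j with
  | zero => rw [Nat.zero_add]; rfl
  | succ a ih =>
    have : a + 1 + b = (a + b) + 1 := by omega
    rw [this, pvIter, pvIter, ih]

theorem pvIter_fix (ds : List Int) (m r : Nat) (h : pvStep ds r = r) : pvIter ds m r = r := by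
  induction m with
  | zero => rfl
  | succ m ih => rw [pvIter_succ_right, ih, h]

theorem pvIter_stay (ds : List Int) (k m j r : Nat) (hk : pvIter ds k j = r)
    (hfix : pvStep ds r = r) (hm : k ≤ m) : pvIter ds m j = r := by
  have : m = k + (m - k) := by omega
  rw [this, pvIter_add, hk, pvIter_fix ds _ r hfix]

theorem pvIter_lt (ds : List Int) (hb : ∀ j, j < ds.length → (ds.getD j 0).toNat < ds.length)
    (k j : Nat) (hj : j < ds.length) : pvIter ds k j < ds.length := by
  induction k generalizing j with
  | zero => exact hj
  | succ k ih => exact ih _ (hb j hj)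

theorem pv_getD_set_ne (xs : List Int) (j i : Nat) (v : Int) (h : i ≠ j) :
    (xs.set j v).getD i 0 = xs.getD i 0 := by
  simp [List.getD_eq_getElem?_getD, List.getElem?_set_ne (Ne.symm h)]

theorem pv_getD_set_self (xs : List Int) (j : Nat) (v : Int) (h : j < xs.length) :
    (xs.set j v).getD j 0 = v := by
  simp [List.getD_eq_getElem?_getD, h]

theorem pv_getD_map (xs : List Int) (g : Int → Int) (j : Nat) (h : j < xs.length) :
    (xs.map g).getD j 0 = g (xs.getD j 0) := by
  simp [List.getD_eq_getElem?_getD, List.getElem?_eq_getElem h]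

-- facts packaged from the invariant
theorem pvRoot_nonneg (B : Nat) (ds f : List Int) (h : pvInv B ds f) (j : Nat)
    (hj : j < ds.length) : 0 ≤ f.getD j 0 := by
  obtain ⟨-, -, h3⟩ := h
  obtain ⟨k, -, hit, -⟩ := h3 j hj
  omega

theorem pvRoot_lt (B : Nat) (ds f : List Int) (h : pvInv B ds f) (j : Nat)
    (hj : j < ds.length) : (f.getD j 0).toNat < ds.length := by
  obtain ⟨-, h2, h3⟩ := h
  obtain ⟨k, -, hit, -⟩ := h3 j hj
  have := pvIter_lt ds (fun j hj => (h2 j hj).2) k j hj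
  omega

theorem pvRoot_fixN (B : Nat) (ds f : List Int) (h : pvInv B ds f) (j : Nat)
    (hj : j < ds.length) : pvStep ds (f.getD j 0).toNat = (f.getD j 0).toNat := by
  obtain ⟨-, -, h3⟩ := h
  obtain ⟨k, -, -, hfix⟩ := h3 j hj
  unfold pvStep
  rw [hfix]

-- f is constant along a parent step, hence along chains
theorem pvF_step (B : Nat) (ds f : List Int) (h : pvInv B ds f) (j : Nat)
    (hj : j < ds.length) : f.getD (pvStep ds j) 0 = f.getD j 0 := by
  obtain ⟨h1, h2, h3⟩ := h
  obtain ⟨k, hk, hit, hfix⟩ := h3 j hj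
  rcases k with - | k'
  · -- j is its own root: f j = j and ds[j] = j
    have hit' : (j : Int) = f.getD j 0 := hit
    have hjt : (f.getD j 0).toNat = j := by omega
    rw [hjt] at hfix
    have hstep : pvStep ds j = j := by unfold pvStep; rw [hfix]; omega
    rw [hstep]
  · have hstep : pvStep ds j < ds.length := (h2 j hj).2
    obtain ⟨k2, -, hit2, hfix2⟩ := h3 (pvStep ds j) hstep
    have hc1 : pvIter ds k' (pvStep ds j) = (f.getD j 0).toNat := by
      have := hit
      rw [pvIter] at this
      omega
    have hfx1 : pvStep ds (f.getD j 0).toNat = (f.getD j 0).toNat :=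
      pvRoot_fixN B ds f ⟨h1, h2, h3⟩ j hj
    have hfx2 : pvStep ds (f.getD (pvStep ds j) 0).toNat = (f.getD (pvStep ds j) 0).toNat :=
      pvRoot_fixN B ds f ⟨h1, h2, h3⟩ _ hstep
    have e1 : pvIter ds (k' + k2) (pvStep ds j) = (f.getD j 0).toNat :=
      pvIter_stay ds k' _ _ _ hc1 hfx1 (by omega)
    have e2 : pvIter ds (k' + k2) (pvStep ds j) = (f.getD (pvStep ds j) 0).toNat :=
      pvIter_stay ds k2 _ _ _ (by omega) hfx2 (by omega)
    have hn1 : 0 ≤ f.getD j 0 := by omega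
    have hn2 : 0 ≤ f.getD (pvStep ds j) 0 := by omega
    omega

theorem pvF_iter (B : Nat) (ds f : List Int) (h : pvInv B ds f) (m j : Nat)
    (hj : j < ds.length) : f.getD (pvIter ds m j) 0 = f.getD j 0 := by
  induction m generalizing j with
  | zero => rfl
  | succ m ih =>
    rw [pvIter]
    have hb : pvStep ds j < ds.length := (h.2.1 j hj).2
    rw [ih (pvStep ds j) hb, pvF_step B ds f h j hj]

theorem pvF_root (B : Nat) (ds f : List Int) (h : pvInv B ds f) (j : Nat)
    (hj : j < ds.length) : f.getD (f.getD j 0).toNat 0 = f.getD j 0 := by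
  obtain ⟨k, -, hit, -⟩ := h.2.2 j hj
  have := pvF_iter B ds f h k j hj
  rw [show (f.getD j 0).toNat = pvIter ds k j by omega]
  exact this

-- iteration is unchanged by a set at a cell the chain does not visit
theorem pvIter_set_eq (ds : List Int) (jc : Nat) (v : Int) (m i : Nat)
    (h : ∀ m', m' < m → pvIter ds m' i ≠ jc) :
    pvIter (ds.set jc v) m i = pvIter ds m i := by
  induction m generalizing i with
  | zero => rfl
  | succ m ih =>
    have hi : i ≠ jc := h 0 (by omega)
    have hstep : pvStep (ds.set jc v) i = pvStep ds i := by
      unfold pvStep; rw [pv_getD_set_ne ds jc i v hi]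
    rw [pvIter, pvIter, hstep]
    exact ih (pvStep ds i) (fun m' hm' => by
      have := h (m' + 1) (by omega)
      rwa [pvIter] at this)

-- first hit of a cell on a chain
theorem pvFirstHit (ds : List Int) (k i jc : Nat) (h : pvIter ds k i = jc) :
    ∃ m ≤ k, pvIter ds m i = jc ∧ ∀ m', m' < m → pvIter ds m' i ≠ jc := by
  classical
  have hex : ∃ m, pvIter ds m i = jc := ⟨k, h⟩
  refine ⟨Nat.find hex, Nat.find_min' hex h, Nat.find_spec hex, fun m' hm' => Nat.find_min hex hm'⟩

-- Path compression step: writing a node's root into its cell preserves the invariant.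
theorem pvSetRoot (B : Nat) (ds f : List Int) (h : pvInv B ds f) (jc : Nat)
    (hjc : jc < ds.length) : pvInv B (ds.set jc (f.getD jc 0)) f := by
  obtain ⟨h1, h2, h3⟩ := h
  have hInv : pvInv B ds f := ⟨h1, h2, h3⟩
  set v := f.getD jc 0 with hv
  have hvnn : 0 ≤ v := pvRoot_nonneg B ds f hInv jc hjc
  have hvlt : v.toNat < ds.length := pvRoot_lt B ds f hInv jc hjc
  refine ⟨by simpa using h1, ?_, ?_⟩
  · intro j hj
    simp only [List.length_set] at hj ⊢
    by_cases hjj : j = jc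
    · subst hjj; rw [pv_getD_set_self ds j v hj]; omega
    · rw [pv_getD_set_ne ds jc j v hjj]; exact h2 j hj
  · intro j hj
    simp only [List.length_set] at hj ⊢
    obtain ⟨k, hk, hit, hfix⟩ := h3 j hj
    have hroot_fix : (ds.set jc v).getD (f.getD j 0).toNat 0 = f.getD j 0 := by
      by_cases hrj : (f.getD j 0).toNat = jc
      · rw [hrj, pv_getD_set_self ds jc v hjc, hv]
        have := pvF_root B ds f hInv j hj
        rw [hrj] at this
        have hjn : 0 ≤ f.getD j 0 := pvRoot_nonneg B ds f hInv j hj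
        omega
      · rw [pv_getD_set_ne ds jc _ v hrj]; exact hfix
    by_cases hhit : ∃ m, m ≤ k ∧ pvIter ds m j = jc
    · obtain ⟨m, hm, hitm⟩ := hhit
      obtain ⟨m0, hm0le, hit0, hno⟩ := pvFirstHit ds m j jc hitm
      have hchain0 : pvIter (ds.set jc v) m0 j = jc := by
        rw [pvIter_set_eq ds jc v m0 j hno]; exact hit0
      have hfjc : f.getD jc 0 = f.getD j 0 := by
        have := pvF_iter B ds f hInv m0 j hj
        rwa [hit0] at this
      by_cases hend : jc = (f.getD j 0).toNat
      · refine ⟨m0, by omega, ?_, hroot_fix⟩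
        rw [hchain0, hend]
        have : 0 ≤ f.getD j 0 := pvRoot_nonneg B ds f hInv j hj
        omega
      · have hfxj : pvStep ds (f.getD j 0).toNat = (f.getD j 0).toNat :=
          pvRoot_fixN B ds f hInv j hj
        have hm0lt : m0 < k := by
          rcases Nat.lt_or_ge m0 k with h' | h'
          · exact h'
          · exfalso
            have : pvIter ds m0 j = (f.getD j 0).toNat :=
              pvIter_stay ds k m0 j _ (by omega) hfxj h'
            omega
        refine ⟨m0 + 1, by omega, ?_, hroot_fix⟩
        rw [pvIter_succ_right, hchain0]
        have hstep : pvStep (ds.set jc v) jc = v.toNat := by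
          unfold pvStep; rw [pv_getD_set_self ds jc v hjc]
        rw [hstep, hv, hfjc]
        have : 0 ≤ f.getD j 0 := pvRoot_nonneg B ds f hInv j hj
        omega
    · refine ⟨k, hk, ?_, hroot_fix⟩
      rw [pvIter_set_eq ds jc v k j (fun m' hm' hbad => hhit ⟨m', by omega, hbad⟩)]
      exact hit

-- Union step: A links root(a) under root(b); B relabels the whole class; invariant re-established
-- with chain bound B+1.
theorem pvUnionSet (B : Nat) (ds f : List Int) (h : pvInv B ds f) (ra rb : Int)
    (hraF : ∃ j, j < ds.length ∧ f.getD j 0 = ra) (hrbF : ∃ j, j < ds.length ∧ f.getD j 0 = rb)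
    (hne : ra ≠ rb) :
    pvInv (B + 1) (ds.set ra.toNat rb) (f.map fun v => if v = ra then rb else v) := by
  obtain ⟨h1, h2, h3⟩ := h
  have hInv : pvInv B ds f := ⟨h1, h2, h3⟩
  obtain ⟨ja, hja, hfa⟩ := hraF
  obtain ⟨jb, hjb, hfb⟩ := hrbF
  have hrann : 0 ≤ ra := hfa ▸ pvRoot_nonneg B ds f hInv ja hja
  have hrbnn : 0 ≤ rb := hfb ▸ pvRoot_nonneg B ds f hInv jb hjb
  have hralt : ra.toNat < ds.length := by
    have := pvRoot_lt B ds f hInv ja hja; rw [hfa] at this; exact this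
  have hrblt : rb.toNat < ds.length := by
    have := pvRoot_lt B ds f hInv jb hjb; rw [hfb] at this; exact this
  have hfra : f.getD ra.toNat 0 = ra := by
    have := pvF_root B ds f hInv ja hja; rw [hfa] at this; exact this
  have hfixb : pvStep ds rb.toNat = rb.toNat := by
    have := pvRoot_fixN B ds f hInv jb hjb; rwa [hfb] at this
  have hab : ra.toNat ≠ rb.toNat := by omega
  refine ⟨by simpa using h1, ?_, ?_⟩
  · intro j hj
    simp only [List.length_set] at hj ⊢
    by_cases hjj : j = ra.toNat
    · subst hjj; rw [pv_getD_set_self ds _ rb hj]; omega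
    · rw [pv_getD_set_ne ds _ j rb hjj]; exact h2 j hj
  · intro j hj
    simp only [List.length_set] at hj ⊢
    obtain ⟨k, hk, hit, hfix⟩ := h3 j hj
    have hjf : j < f.length := by omega
    have hmapj : (f.map fun v => if v = ra then rb else v).getD j 0
        = if f.getD j 0 = ra then rb else f.getD j 0 := pv_getD_map f _ j hjf
    by_cases hcls : f.getD j 0 = ra
    · -- j's class is relabelled to rb; its old chain reaches ra.toNat, then one more step to rb
      have hend : pvIter ds k j = ra.toNat := by omega
      obtain ⟨m0, hm0le, hit0, hno⟩ := pvFirstHit ds k j ra.toNat hend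
      have hchain0 : pvIter (ds.set ra.toNat rb) m0 j = ra.toNat := by
        rw [pvIter_set_eq ds _ rb m0 j hno]; exact hit0
      refine ⟨m0 + 1, by omega, ?_, ?_⟩
      · rw [pvIter_succ_right, hchain0]
        have hstep : pvStep (ds.set ra.toNat rb) ra.toNat = rb.toNat := by
          unfold pvStep; rw [pv_getD_set_self ds _ rb hralt]
        rw [hstep, hmapj, if_pos hcls]
        omega
      · rw [hmapj, if_pos hcls]
        have hdsrb : ds.getD rb.toNat 0 = rb := by
          obtain ⟨k2, -, -, hfix2⟩ := h3 jb hjb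
          rwa [hfb] at hfix2
        rw [pv_getD_set_ne ds _ _ rb (Ne.symm hab)]
        exact hdsrb
    · -- j's class keeps its root; its old chain never visits ra.toNat
      have hnov : ∀ m', m' < k → pvIter ds m' j ≠ ra.toNat := by
        intro m' _ hbad
        have := pvF_iter B ds f hInv m' j hj
        rw [hbad, hfra] at this
        exact hcls this.symm
      have hendne : (f.getD j 0).toNat ≠ ra.toNat := by
        intro hbad
        have hjn : 0 ≤ f.getD j 0 := pvRoot_nonneg B ds f hInv j hj
        have : f.getD j 0 = ra := by omega
        exact hcls this
      refine ⟨k, by omega, ?_, ?_⟩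
      · rw [pvIter_set_eq ds _ rb k j hnov, hmapj, if_neg hcls]
        exact hit
      · rw [hmapj, if_neg hcls]
        rw [pv_getD_set_ne ds _ _ rb hendne]
        exact hfix

-- index normalisation (Python negative indices) and total get/set on in-range indices
def pvNorm (L : Nat) (i : Int) : Nat := if i < 0 then (i + L).toNat else i.toNat

theorem pv_pyGet_inrange (xs : List Int) (i : Int) (h1 : -(xs.length:Int) ≤ i)
    (h2 : i < xs.length) :
    PySem.List.pyGet? xs i = some (xs.getD (pvNorm xs.length i) 0) := by
  unfold pvNorm
  by_cases hneg : i < 0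
  · rw [if_pos hneg]
    simp only [PySem.List.pyGet?, PySem.List.pyIdx?]
    rw [if_neg (by omega), if_pos h1]
    simp only [Option.bind_some]
    have hlt : (i + xs.length).toNat < xs.length := by omega
    rw [show xs.length - (-i).toNat = (i + xs.length).toNat by omega]
    rw [List.getElem?_eq_getElem hlt, List.getD_eq_getElem _ _ hlt]
  · rw [if_neg hneg]
    simp only [PySem.List.pyGet?, PySem.List.pyIdx?]
    rw [if_pos (by omega), if_pos h2]
    simp only [Option.bind_some]
    have hlt : i.toNat < xs.length := by omega
    rw [List.getElem?_eq_getElem hlt, List.getD_eq_getElem _ _ hlt]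

theorem pv_pyGetD_inrange (xs : List Int) (i : Int) (h1 : -(xs.length:Int) ≤ i)
    (h2 : i < xs.length) :
    PySem.List.pyGetD xs i 0 = xs.getD (pvNorm xs.length i) 0 := by
  unfold PySem.List.pyGetD
  rw [pv_pyGet_inrange xs i h1 h2]
  rfl

theorem pv_pySetD_inrange (xs : List Int) (i : Int) (v : Int) (h1 : -(xs.length:Int) ≤ i)
    (h2 : i < xs.length) :
    PySem.List.pySetD xs i v = xs.set (pvNorm xs.length i) v := by
  unfold pvNorm
  by_cases hneg : i < 0
  · rw [if_pos hneg]
    simp only [PySem.List.pySetD, PySem.List.pySet?, PySem.List.pyIdx?]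
    rw [if_neg (by omega), if_pos h1]
    simp only [Option.map_some, Option.getD_some]
    congr 1
    omega
  · rw [if_neg hneg]
    simp only [PySem.List.pySetD, PySem.List.pySet?, PySem.List.pyIdx?]
    rw [if_pos (by omega), if_pos h2]
    simp only [Option.map_some, Option.getD_some]

theorem pvNorm_lt (L : Nat) (i : Int) (h1 : -(L:Int) ≤ i) (h2 : i < L) : pvNorm L i < L := by
  unfold pvNorm; split <;> omega

theorem pvNorm_nonneg_eq (L : Nat) (i : Int) (h : 0 ≤ i) : pvNorm L i = i.toNat := by
  unfold pvNorm; rw [if_neg (by omega)]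

-- find on a nonnegative (already normalised) index: returns the f-root, preserves the invariant
theorem pvFindNN (B : Nat) (f : List Int) :
    ∀ (fuel : Nat) (ds : List Int) (j k : Nat), pvInv B ds f → j < ds.length →
      pvIter ds k j = (f.getD j 0).toNat → k < fuel →
      (pvFindA fuel ds (j : Int)).2 = f.getD j 0 ∧
      pvInv B (pvFindA fuel ds (j : Int)).1 f ∧
      (pvFindA fuel ds (j : Int)).1.length = ds.length := by
  intro fuel
  induction fuel with
  | zero => intro ds j k _ _ _ hk; omega
  | succ fuel ih =>
    intro ds j k hInv hj hchain hk
    have hget : PySem.List.pyGet? ds (j : Int) = some (ds.getD j 0) := by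
      have := pv_pyGet_inrange ds (j : Int) (by omega) (by omega)
      rwa [show pvNorm ds.length (j : Int) = j by unfold pvNorm; split <;> omega] at this
    by_cases heq : ds.getD j 0 = (j : Int)
    · have hres : pvFindA (fuel+1) ds (j : Int) = (ds, (j : Int)) := by
        simp only [pvFindA, hget, if_pos heq]
      have hstep : pvStep ds j = j := by unfold pvStep; rw [heq]; omega
      have hfj : f.getD j 0 = (j : Int) := by
        have hfixj := pvIter_fix ds k j hstep
        rw [hfixj] at hchain
        have := pvRoot_nonneg B ds f hInv j hj
        omega
      rw [hres, hfj]
      exact ⟨rfl, hInv, rfl⟩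
    · have hp0 : 0 ≤ ds.getD j 0 := (hInv.2.1 j hj).1
      have hplt : (ds.getD j 0).toNat < ds.length := (hInv.2.1 j hj).2
      rcases k with - | k'
      · exfalso
        have hj0 : j = (f.getD j 0).toNat := hchain
        have hnn := pvRoot_nonneg B ds f hInv j hj
        obtain ⟨k2, -, -, hfix⟩ := hInv.2.2 j hj
        rw [← hj0] at hfix
        exact heq (by omega)
      · have hpstep : pvStep ds j = (ds.getD j 0).toNat := rfl
        have hfp : f.getD (ds.getD j 0).toNat 0 = f.getD j 0 := by
          have := pvF_step B ds f hInv j hj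
          rwa [hpstep] at this
        have hchainp : pvIter ds k' (ds.getD j 0).toNat = (f.getD (ds.getD j 0).toNat 0).toNat := by
          rw [hfp]
          have h' := hchain
          rw [pvIter, hpstep] at h'
          exact h'
        obtain ⟨ih2, ihInv, ihlen⟩ := ih ds (ds.getD j 0).toNat k' hInv hplt hchainp (by omega)
        have hpcast : ds.getD j 0 = (((ds.getD j 0).toNat : Nat) : Int) := by omega
        have hres : pvFindA (fuel+1) ds (j : Int) =
            (PySem.List.pySetD (pvFindA fuel ds (((ds.getD j 0).toNat : Nat) : Int)).1 (j : Int)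
               (pvFindA fuel ds (((ds.getD j 0).toNat : Nat) : Int)).2,
             (pvFindA fuel ds (((ds.getD j 0).toNat : Nat) : Int)).2) := by
          conv_lhs => rw [pvFindA, hget]
          rw [← hpcast]
          simp only [if_neg heq]
        rw [hres]
        have hjlen : j < (pvFindA fuel ds (((ds.getD j 0).toNat : Nat) : Int)).1.length := by
          rw [ihlen]; exact hj
        have hset : PySem.List.pySetD (pvFindA fuel ds (((ds.getD j 0).toNat : Nat) : Int)).1 (j : Int)
            (pvFindA fuel ds (((ds.getD j 0).toNat : Nat) : Int)).2
            = (pvFindA fuel ds (((ds.getD j 0).toNat : Nat) : Int)).1.set j (f.getD j 0) := by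
          rw [ih2, hfp]
          rw [pv_pySetD_inrange _ (j : Int) _ (by omega) (by omega)]
          rw [show pvNorm (pvFindA fuel ds (((ds.getD j 0).toNat : Nat) : Int)).1.length (j : Int) = j by
            unfold pvNorm; split <;> omega]
        rw [hset]
        refine ⟨by rw [ih2, hfp], ?_, by rw [List.length_set]; exact ihlen⟩
        exact pvSetRoot B _ f ihInv j hjlen

-- find at any in-range Python index (possibly negative)
theorem pvFindAny (B fuel : Nat) (ds f : List Int) (node : Int) (hInv : pvInv B ds f)
    (hlo : -(ds.length:Int) ≤ node) (hhi : node < ds.length) (hfuel : B + 2 ≤ fuel) :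
    (pvFindA fuel ds node).2 = f.getD (pvNorm ds.length node) 0 ∧
    pvInv B (pvFindA fuel ds node).1 f ∧
    (pvFindA fuel ds node).1.length = ds.length := by
  by_cases hneg : node < 0
  · have hj : pvNorm ds.length node = (node + ds.length).toNat := by unfold pvNorm; rw [if_pos hneg]
    have hjlt : pvNorm ds.length node < ds.length := pvNorm_lt _ _ hlo hhi
    rcases fuel with - | fuel'
    · omega
    · have hget : PySem.List.pyGet? ds node = some (ds.getD (pvNorm ds.length node) 0) :=
        pv_pyGet_inrange ds node hlo hhi
      have hp0 : 0 ≤ ds.getD (pvNorm ds.length node) 0 := (hInv.2.1 _ hjlt).1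
      have hplt : (ds.getD (pvNorm ds.length node) 0).toNat < ds.length := (hInv.2.1 _ hjlt).2
      have heq : ¬ ds.getD (pvNorm ds.length node) 0 = node := by omega
      obtain ⟨kp, hkp, hitp, -⟩ := hInv.2.2 (ds.getD (pvNorm ds.length node) 0).toNat hplt
      have hchainp : pvIter ds kp (ds.getD (pvNorm ds.length node) 0).toNat
          = (f.getD (ds.getD (pvNorm ds.length node) 0).toNat 0).toNat := by omega
      obtain ⟨ih2, ihInv, ihlen⟩ :=
        pvFindNN B f fuel' ds (ds.getD (pvNorm ds.length node) 0).toNat kp hInv hplt hchainp (by omega)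
      have hfp : f.getD (ds.getD (pvNorm ds.length node) 0).toNat 0
          = f.getD (pvNorm ds.length node) 0 := by
        have := pvF_step B ds f hInv (pvNorm ds.length node) hjlt
        rwa [show pvStep ds (pvNorm ds.length node) = (ds.getD (pvNorm ds.length node) 0).toNat
          from rfl] at this
      have hpcast : ds.getD (pvNorm ds.length node) 0
          = (((ds.getD (pvNorm ds.length node) 0).toNat : Nat) : Int) := by omega
      have hres : pvFindA (fuel'+1) ds node =
          (PySem.List.pySetD
             (pvFindA fuel' ds (((ds.getD (pvNorm ds.length node) 0).toNat : Nat) : Int)).1 node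
             (pvFindA fuel' ds (((ds.getD (pvNorm ds.length node) 0).toNat : Nat) : Int)).2,
           (pvFindA fuel' ds (((ds.getD (pvNorm ds.length node) 0).toNat : Nat) : Int)).2) := by
        conv_lhs => rw [pvFindA, hget]
        rw [← hpcast]
        simp only [if_neg heq]
      rw [hres]
      have hset : PySem.List.pySetD
          (pvFindA fuel' ds (((ds.getD (pvNorm ds.length node) 0).toNat : Nat) : Int)).1 node
          (pvFindA fuel' ds (((ds.getD (pvNorm ds.length node) 0).toNat : Nat) : Int)).2
          = (pvFindA fuel' ds (((ds.getD (pvNorm ds.length node) 0).toNat : Nat) : Int)).1.set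
              (pvNorm ds.length node) (f.getD (pvNorm ds.length node) 0) := by
        rw [ih2, hfp]
        rw [pv_pySetD_inrange _ node _ (by omega) (by omega)]
        rw [ihlen]
      rw [hset]
      refine ⟨by rw [ih2, hfp], ?_, by rw [List.length_set]; exact ihlen⟩
      exact pvSetRoot B _ f ihInv (pvNorm ds.length node) (by rw [ihlen]; exact hjlt)
  · have hj : node = ((pvNorm ds.length node : Nat) : Int) := by unfold pvNorm; rw [if_neg hneg]; omega
    have hjlt : pvNorm ds.length node < ds.length := pvNorm_lt _ _ hlo hhi
    obtain ⟨k, hk, hit, -⟩ := hInv.2.2 (pvNorm ds.length node) hjlt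
    have hchain : pvIter ds k (pvNorm ds.length node) = (f.getD (pvNorm ds.length node) 0).toNat := by
      omega
    have := pvFindNN B f fuel ds (pvNorm ds.length node) k hInv hjlt hchain (by omega)
    rwa [← hj] at this

-- The main loop equivalence, by induction on the remaining queries.
theorem pvLoopEq (F : Nat) :
    ∀ (qs : List (Int × Int × Int)) (B : Nat) (ds f : List Int) (acc : List String),
      pvInv B ds f → B + qs.length + 2 ≤ F →
      (∀ q ∈ qs, (q.1 = 0 ∨ q.1 = 1) →
        (-(ds.length:Int) ≤ q.2.1 ∧ q.2.1 < ds.length ∧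
         -(ds.length:Int) ≤ q.2.2 ∧ q.2.2 < ds.length)) →
      pvLoopA F ds acc qs = pvLoopB f acc qs := by
  intro qs
  induction qs with
  | nil => intro B ds f acc _ _ _; rfl
  | cons q qs ih =>
    intro B ds f acc hInv hF hq
    simp only [List.length_cons] at hF
    obtain ⟨op, a, b⟩ := q
    have hL : f.length = ds.length := hInv.1
    by_cases hop0 : op = 0
    · have hbounds := hq (op, a, b) (by simp) (Or.inl hop0)
      have ha1 : -(ds.length:Int) ≤ a := hbounds.1
      have ha2 : a < ds.length := hbounds.2.1
      have hb1 : -(ds.length:Int) ≤ b := hbounds.2.2.1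
      have hb2 : b < ds.length := hbounds.2.2.2
      obtain ⟨hA2, hAInv, hAlen⟩ := pvFindAny B F ds f a hInv ha1 ha2 (by omega)
      obtain ⟨hB2, hBInv, hBlen⟩ := pvFindAny B F (pvFindA F ds a).1 f b hAInv
        (by rw [hAlen]; exact hb1) (by rw [hAlen]; exact hb2) (by omega)
      rw [hAlen] at hB2 hBlen
      have hBlen' : (pvFindA F (pvFindA F ds a).1 b).1.length = ds.length := hBlen
      have hga : PySem.List.pyGetD f a 0 = f.getD (pvNorm ds.length a) 0 := by
        rw [pv_pyGetD_inrange f a (by omega) (by omega), hL]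
      have hgb : PySem.List.pyGetD f b 0 = f.getD (pvNorm ds.length b) 0 := by
        rw [pv_pyGetD_inrange f b (by omega) (by omega), hL]
      rw [pvLoopA, pvLoopB, if_pos hop0, if_pos hop0]
      unfold pvUnionA
      simp only [hga, hgb, hA2, hB2]
      by_cases hrr : f.getD (pvNorm ds.length a) 0 = f.getD (pvNorm ds.length b) 0
      · rw [if_pos hrr, if_pos hrr]
        exact ih B _ f acc hBInv (by omega)
          (fun q' hq' ho => by rw [hBlen']; exact hq q' (by simp [hq']) ho)
      · rw [if_neg hrr, if_neg hrr]
        have hnn : 0 ≤ f.getD (pvNorm ds.length a) 0 :=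
          pvRoot_nonneg B ds f hInv _ (pvNorm_lt _ _ ha1 ha2)
        have hlt : (f.getD (pvNorm ds.length a) 0).toNat < ds.length :=
          pvRoot_lt B ds f hInv _ (pvNorm_lt _ _ ha1 ha2)
        have hside1 : -(((pvFindA F (pvFindA F ds a).1 b).1.length : Int))
            ≤ f.getD (pvNorm ds.length a) 0 := by rw [hBlen']; omega
        have hside2 : f.getD (pvNorm ds.length a) 0
            < ((pvFindA F (pvFindA F ds a).1 b).1.length : Int) := by rw [hBlen']; omega
        have hset : PySem.List.pySetD (pvFindA F (pvFindA F ds a).1 b).1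
            (f.getD (pvNorm ds.length a) 0) (f.getD (pvNorm ds.length b) 0)
            = (pvFindA F (pvFindA F ds a).1 b).1.set (f.getD (pvNorm ds.length a) 0).toNat
                (f.getD (pvNorm ds.length b) 0) := by
          rw [pv_pySetD_inrange _ _ _ hside1 hside2]
          rw [pvNorm_nonneg_eq _ _ hnn]
        rw [hset]
        have hUInv := pvUnionSet B _ f hBInv (f.getD (pvNorm ds.length a) 0)
          (f.getD (pvNorm ds.length b) 0)
          ⟨pvNorm ds.length a, by rw [hBlen']; exact pvNorm_lt _ _ ha1 ha2, rfl⟩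
          ⟨pvNorm ds.length b, by rw [hBlen']; exact pvNorm_lt _ _ hb1 hb2, rfl⟩ hrr
        exact ih (B+1) _ _ acc hUInv (by omega)
          (fun q' hq' ho => by
            rw [List.length_set, hBlen']
            exact hq q' (by simp [hq']) ho)
    · by_cases hop1 : op = 1
      · have hbounds := hq (op, a, b) (by simp) (Or.inr hop1)
        have ha1 : -(ds.length:Int) ≤ a := hbounds.1
        have ha2 : a < ds.length := hbounds.2.1
        have hb1 : -(ds.length:Int) ≤ b := hbounds.2.2.1
        have hb2 : b < ds.length := hbounds.2.2.2
        obtain ⟨hA2, hAInv, hAlen⟩ := pvFindAny B F ds f a hInv ha1 ha2 (by omega)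
        obtain ⟨hB2, hBInv, hBlen⟩ := pvFindAny B F (pvFindA F ds a).1 f b hAInv
          (by rw [hAlen]; exact hb1) (by rw [hAlen]; exact hb2) (by omega)
        rw [hAlen] at hB2 hBlen
        have hga : PySem.List.pyGetD f a 0 = f.getD (pvNorm ds.length a) 0 := by
          rw [pv_pyGetD_inrange f a (by omega) (by omega), hL]
        have hgb : PySem.List.pyGetD f b 0 = f.getD (pvNorm ds.length b) 0 := by
          rw [pv_pyGetD_inrange f b (by omega) (by omega), hL]
        rw [pvLoopA, pvLoopB, if_neg hop0, if_neg hop0, if_pos hop1, if_pos hop1]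
        simp only [hga, hgb, hA2, hB2]
        exact ih B _ f _ hBInv (by omega)
          (fun q' hq' ho => by rw [hBlen]; exact hq q' (by simp [hq']) ho)
      · rw [pvLoopA, pvLoopB, if_neg hop0, if_neg hop0, if_neg hop1, if_neg hop1]
        exact ih B ds f acc hInv (by omega) (fun q' hq' ho => hq q' (by simp [hq']) ho)

-- the initial array [0, …, N] is its own flat representative array
theorem pvInit (n : Int) : pvInv 0 (PySem.List.pyRange 0 n 1) (PySem.List.pyRange 0 n 1) := by
  have hget : ∀ j, j < (PySem.List.pyRange 0 n 1).length →
      (PySem.List.pyRange 0 n 1).getD j 0 = (j : Int) := by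
    intro j hj
    rw [PySem.List.length_pyRange_one] at hj
    rw [List.getD_eq_getElem?_getD, PySem.List.getElem?_pyRange_one]
    have : (j : Int) < n := by omega
    simp [this]
  refine ⟨rfl, ?_, ?_⟩
  · intro j hj
    rw [hget j hj]
    omega
  · intro j hj
    refine ⟨0, le_refl 0, ?_, ?_⟩
    · rw [hget j hj]; rfl
    · rw [hget j hj]
      have : ((j : Int)).toNat = j := by omega
      rw [this, hget j hj]

-- ===== VERDICT (by name: the statement is the Claim_ definition above) =====
theorem solution_spec : Claim_equal_solution := by
  intro N queries _ hPre
  unfold Spec_solution solution solution_alt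
  refine pvLoopEq (queries.length + 2) queries 0 _ _ [] (pvInit (N+1)) (by omega) ?_
  intro q hq ho
  obtain ⟨h1, h2, h3, h4⟩ := hPre q hq ho
  have hlen : ((PySem.List.pyRange 0 (N+1) 1).length : Int) = max (N+1) 0 := by
    rw [PySem.List.length_pyRange_one]
    omega
  refine ⟨by omega, by omega, by omega, by omega⟩
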